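-- pv_equiv track=rewrite | github.com/TreeWonTwoToFor/personal_projects | Python/Working/Tetris/main.py | spawn_piece
-- ===== SOURCE A (Python) =====
-- def spawn_piece(game_board, piece_letter):
--     player_died = False
--     spawn_location = (3, 0)
--     # where are the tiles?
--     piece_tiles = []
--     match piece_letter:
--         case 'i':
--             for i in range(4): piece_tiles.append((spawn_location[0]+i, spawn_location[1]))
--         case 'o':
--             for i in range(2):
--                 for j in range(2):
--                     piece_tiles.append((spawn_location[0]+i+1, spawn_location[1]+j))
--         case 't':
--             for i in range(3):
--                 piece_tiles.append((spawn_location[0]+i, spawn_location[1]))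
--             piece_tiles.append((spawn_location[0]+1, spawn_location[1]+1))
--         case 'z':
--             for i in range(4):
--                 piece_tiles.append((spawn_location[0]+(i-i//2), spawn_location[1]+i//2))
--         case 's':
--             for i in range(4):
--                 piece_tiles.append((spawn_location[0]+(i-i//2), spawn_location[1]+(1-i//2)))
--         case 'l':
--             for i in range(3):
--                 piece_tiles.append((spawn_location[0]+i, spawn_location[1]))
--             piece_tiles.append((spawn_location[0], spawn_location[1]+1))
--         case 'j':
--             for i in range(3):
--                 piece_tiles.append((spawn_location[0]+i, spawn_location[1]))
--             piece_tiles.append((spawn_location[0]+2, spawn_location[1]+1))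
--     # can we put the tiles on the board?
--     for tile in piece_tiles:
--         if game_board[tile[0]][tile[1]] != '_':
--             player_died = True
--             break
--         game_board[tile[0]][tile[1]] = '*'
--     return player_died
-- ===== SOURCE B (Python) =====
-- # B: precomputed table of absolute tile coordinates per piece, collision tested with any();
-- # return value matches A; side effects differ: B marks tiles only when the spawn succeeds,
-- # while A marks the tiles that precede the first collision (equivalence claimed is about the return value).
-- _PIECE_TILES = {
--     'i': [(3, 0), (4, 0), (5, 0), (6, 0)],
--     'o': [(4, 0), (4, 1), (5, 0), (5, 1)],
--     't': [(3, 0), (4, 0), (5, 0), (4, 1)],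
--     'z': [(3, 0), (4, 0), (4, 1), (5, 1)],
--     's': [(3, 1), (4, 1), (4, 0), (5, 0)],
--     'l': [(3, 0), (4, 0), (5, 0), (3, 1)],
--     'j': [(3, 0), (4, 0), (5, 0), (5, 1)],
-- }
--
-- def spawn_piece(game_board, piece_letter):
--     tiles = _PIECE_TILES.get(piece_letter, [])
--     if any(game_board[x][y] != '_' for x, y in tiles):
--         return True
--     for x, y in tiles:
--         game_board[x][y] = '*'
--     return False
-- ===== Notes on version B (the rewrite author's own statement) =====
-- stated objective: simpler
-- what changed: The per-piece coordinate-generation loops of the match statement are replaced by one precomputed letter->tiles table, and the mutating break-loop is replaced by an any() collision test followed by a plain marking loop.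
import Mathlib
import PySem

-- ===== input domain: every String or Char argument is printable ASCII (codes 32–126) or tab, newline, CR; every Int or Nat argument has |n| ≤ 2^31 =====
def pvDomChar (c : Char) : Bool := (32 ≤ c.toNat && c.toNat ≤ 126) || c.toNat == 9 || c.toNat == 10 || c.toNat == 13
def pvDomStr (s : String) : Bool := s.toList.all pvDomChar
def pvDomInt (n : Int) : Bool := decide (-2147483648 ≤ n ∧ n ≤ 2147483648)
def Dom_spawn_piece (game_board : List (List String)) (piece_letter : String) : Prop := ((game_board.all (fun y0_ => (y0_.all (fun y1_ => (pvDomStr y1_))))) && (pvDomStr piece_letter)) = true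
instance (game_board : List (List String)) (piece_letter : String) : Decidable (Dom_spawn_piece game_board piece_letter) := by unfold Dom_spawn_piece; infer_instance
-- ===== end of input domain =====

-- ===== PORT A =====
-- B changes: match-statement tile generation -> precomputed table, mutating break-loop -> any() scan (simpler);
-- only the RETURN value is proved equal: A marks board cells in place up to the first collision, B marks them only on success.

-- game_board[x][y]  (none = IndexError)
def pvCell? (b : List (List String)) (x y : Int) : Option String :=
  (PySem.List.pyGet? b x).bind fun row => PySem.List.pyGet? row y

-- game_board[x][y] = v  (reached in A only after pvCell? succeeded, so both indices are in range)
def pvSetCell (b : List (List String)) (x y : Int) (v : String) : List (List String) :=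
  match PySem.List.pyGet? b x with
  | none => b
  | some row => PySem.List.pySetD b x (PySem.List.pySetD row y v)

-- the match statement of A, loop for loop
def pvTilesA (piece_letter : String) : List (Int × Int) :=
  let s : Int × Int := (3, 0)
  if piece_letter = "i" then
    (PySem.List.pyRange 0 4 1).foldl (fun a i => a ++ [(s.1 + i, s.2)]) []
  else if piece_letter = "o" then
    (PySem.List.pyRange 0 2 1).foldl
      (fun a i => (PySem.List.pyRange 0 2 1).foldl (fun a j => a ++ [(s.1 + i + 1, s.2 + j)]) a) []
  else if piece_letter = "t" then
    ((PySem.List.pyRange 0 3 1).foldl (fun a i => a ++ [(s.1 + i, s.2)]) []) ++ [(s.1 + 1, s.2 + 1)]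
  else if piece_letter = "z" then
    (PySem.List.pyRange 0 4 1).foldl
      (fun a i => a ++ [(s.1 + (i - PySem.Int.floordiv i 2), s.2 + PySem.Int.floordiv i 2)]) []
  else if piece_letter = "s" then
    (PySem.List.pyRange 0 4 1).foldl
      (fun a i => a ++ [(s.1 + (i - PySem.Int.floordiv i 2), s.2 + (1 - PySem.Int.floordiv i 2))]) []
  else if piece_letter = "l" then
    ((PySem.List.pyRange 0 3 1).foldl (fun a i => a ++ [(s.1 + i, s.2)]) []) ++ [(s.1, s.2 + 1)]
  else if piece_letter = "j" then
    ((PySem.List.pyRange 0 3 1).foldl (fun a i => a ++ [(s.1 + i, s.2)]) []) ++ [(s.1 + 2, s.2 + 1)]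
  else []

-- A's placement loop: break-with-flag on the first occupied cell, mark free cells in place
def spawnLoopA : List (List String) → List (Int × Int) → Bool
  | _, [] => false
  | b, t :: rest =>
    match pvCell? b t.1 t.2 with
    | none => false  -- Python raises IndexError here; Pre_spawn_piece excludes these inputs
    | some c => if c ≠ "_" then true else spawnLoopA (pvSetCell b t.1 t.2 "*") rest

def spawn_piece (game_board : List (List String)) (piece_letter : String) : Bool :=
  spawnLoopA game_board (pvTilesA piece_letter)

-- ===== PORT B =====
-- _PIECE_TILES
def pvTableB : PySem.Dict String (List (Int × Int)) :=
  PySem.Dict.ofList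
    [("i", [(3, 0), (4, 0), (5, 0), (6, 0)]),
     ("o", [(4, 0), (4, 1), (5, 0), (5, 1)]),
     ("t", [(3, 0), (4, 0), (5, 0), (4, 1)]),
     ("z", [(3, 0), (4, 0), (4, 1), (5, 1)]),
     ("s", [(3, 1), (4, 1), (4, 0), (5, 0)]),
     ("l", [(3, 0), (4, 0), (5, 0), (3, 1)]),
     ("j", [(3, 0), (4, 0), (5, 0), (5, 1)])]

-- the cell read inside B's any(); the "_" default is reachable only where Python B raises (outside Pre_)
def pvCellD (b : List (List String)) (x y : Int) : String :=
  (pvCell? b x y).getD "_"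

-- B returns the any(); the marking loop after it does not touch the return value
def spawn_piece_alt (game_board : List (List String)) (piece_letter : String) : Bool :=
  let tiles := PySem.Dict.getD pvTableB piece_letter []
  tiles.any (fun t => pvCellD game_board t.1 t.2 ≠ "_")

-- ===== PRECONDITION & SPEC =====
-- the tile table once more, independent of both ports, for Pre_ only
def pvTiles (piece_letter : String) : List (Int × Int) :=
  if piece_letter = "i" then [(3, 0), (4, 0), (5, 0), (6, 0)]
  else if piece_letter = "o" then [(4, 0), (4, 1), (5, 0), (5, 1)]
  else if piece_letter = "t" then [(3, 0), (4, 0), (5, 0), (4, 1)]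
  else if piece_letter = "z" then [(3, 0), (4, 0), (4, 1), (5, 1)]
  else if piece_letter = "s" then [(3, 1), (4, 1), (4, 0), (5, 0)]
  else if piece_letter = "l" then [(3, 0), (4, 0), (5, 0), (3, 1)]
  else if piece_letter = "j" then [(3, 0), (4, 0), (5, 0), (5, 1)]
  else []

-- cell read for Pre_, independent of the ports
def pvPreCell? (b : List (List String)) (t : Int × Int) : Option String :=
  (PySem.List.pyGet? b t.1).bind fun row => PySem.List.pyGet? row t.2

-- "A does not raise": as long as every earlier tile was a free in-range cell, the next tile is in range
-- (the piece tiles are pairwise distinct, so reading the ORIGINAL board is exact)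
def pvNoRaise (b : List (List String)) : List (Int × Int) → Bool
  | [] => true
  | t :: rest =>
    (pvPreCell? b t).isSome &&
      (if pvPreCell? b t = some "_" then pvNoRaise b rest else true)

-- Pre_ excludes exactly the boards too small for the piece: there A raises IndexError (B raises too)
def Pre_spawn_piece (game_board : List (List String)) (piece_letter : String) : Prop :=
  pvNoRaise game_board (pvTiles piece_letter) = true
instance (game_board : List (List String)) (piece_letter : String) : Decidable (Pre_spawn_piece game_board piece_letter) := by unfold Pre_spawn_piece; infer_instance

def pvWitness_spawn_piece : List (List String) × String :=
  ([["_", "_"], ["_", "_"], ["_", "_"], ["_", "_"], ["_", "_"], ["_", "_"], ["_", "_"]], "i")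

def Spec_spawn_piece (game_board : List (List String)) (piece_letter : String) (out : Bool) : Prop := out = spawn_piece_alt game_board piece_letter
instance (game_board : List (List String)) (piece_letter : String) (out : Bool) : Decidable (Spec_spawn_piece game_board piece_letter out) := by unfold Spec_spawn_piece; infer_instance

-- ===== CLAIM (what is proved, stated in full; the proofs are below) =====
def Claim_equal_spawn_piece : Prop := ∀ (game_board : List (List String)) (piece_letter : String), Dom_spawn_piece game_board piece_letter → Pre_spawn_piece game_board piece_letter → Spec_spawn_piece game_board piece_letter (spawn_piece game_board piece_letter)

-- ===== LEMMAS AND PROOFS =====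

-- the three tile tables agree
theorem tilesA_eq_tiles (l : String) : pvTilesA l = pvTiles l := by
  unfold pvTilesA pvTiles
  split_ifs <;> rfl

theorem tableB_eq_tiles (l : String) : PySem.Dict.getD pvTableB l [] = pvTiles l := by
  have hmk : pvTableB = PySem.Dict.mk
      [("i", [(3, 0), (4, 0), (5, 0), (6, 0)]), ("o", [(4, 0), (4, 1), (5, 0), (5, 1)]),
       ("t", [(3, 0), (4, 0), (5, 0), (4, 1)]), ("z", [(3, 0), (4, 0), (4, 1), (5, 1)]),
       ("s", [(3, 1), (4, 1), (4, 0), (5, 0)]), ("l", [(3, 0), (4, 0), (5, 0), (3, 1)]),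
       ("j", [(3, 0), (4, 0), (5, 0), (5, 1)])] := by decide
  unfold pvTiles
  split_ifs with h1 h2 h3 h4 h5 h6 h7
  · subst h1; decide
  · subst h2; decide
  · subst h3; decide
  · subst h4; decide
  · subst h5; decide
  · subst h6; decide
  · subst h7; decide
  · simp [hmk, PySem.Dict.getD_eq_get?_getD, beq_iff_eq,
      Ne.symm h1, Ne.symm h2, Ne.symm h3, Ne.symm h4, Ne.symm h5, Ne.symm h6, Ne.symm h7,
      PySem.Dict.get?]

theorem tiles_shape (l : String) :
    (pvTiles l).Pairwise (· ≠ ·) ∧ ∀ t ∈ pvTiles l, 0 ≤ t.1 ∧ 0 ≤ t.2 := by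
  unfold pvTiles
  split_ifs <;> constructor <;> decide

theorem cell?_eq_preCell (b : List (List String)) (t : Int × Int) :
    pvCell? b t.1 t.2 = pvPreCell? b t := rfl

-- writing one cell does not change the read of a DIFFERENT cell (nonnegative indices)
theorem cell?_setCell_ne (b : List (List String)) (x y x' y' : Int) (v : String)
    (hx : 0 ≤ x) (hy : 0 ≤ y) (hx' : 0 ≤ x') (hy' : 0 ≤ y')
    (hne : (x, y) ≠ (x', y')) :
    pvCell? (pvSetCell b x y v) x' y' = pvCell? b x' y' := by
  unfold pvSetCell
  cases hrow : PySem.List.pyGet? b x with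
  | none => rfl
  | some row =>
    unfold pvCell?
    dsimp only
    rw [PySem.List.pySetD_of_nonneg b _ hx, PySem.List.pyGet?_of_nonneg _ hx',
        PySem.List.pyGet?_of_nonneg b hx']
    by_cases hxx : x'.toNat = x.toNat
    · have hxeq : x' = x := by omega
      have hyne : y' ≠ y := fun hyy => hne (by rw [hxeq, hyy])
      rw [PySem.List.pyGet?_of_nonneg b hx] at hrow
      have hlt : x.toNat < b.length := by
        by_contra hge
        rw [List.getElem?_eq_none (by omega)] at hrow
        simp at hrow
      rw [hxx, List.getElem?_set_self hlt, hrow]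
      simp only [Option.bind_some]
      rw [PySem.List.pySetD_of_nonneg row _ hy, PySem.List.pyGet?_of_nonneg _ hy',
          PySem.List.pyGet?_of_nonneg row hy',
          List.getElem?_set_ne (by omega : y.toNat ≠ y'.toNat)]
    · rw [List.getElem?_set_ne (by omega : x.toNat ≠ x'.toNat)]

-- pvNoRaise only reads cells, so any cell-preserving board change keeps it
theorem noRaise_congr (ts : List (Int × Int)) (b b' : List (List String))
    (h : ∀ t ∈ ts, pvPreCell? b' t = pvPreCell? b t) :
    pvNoRaise b' ts = pvNoRaise b ts := by
  induction ts with
  | nil => rfl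
  | cons t rest ih =>
    unfold pvNoRaise
    rw [h t (List.mem_cons_self), ih (fun t ht => h t (List.mem_cons_of_mem _ ht))]

-- A's mutating break-loop returns B's any() wherever A does not raise
theorem loop_eq_any (ts : List (Int × Int)) :
    ∀ b : List (List String), ts.Pairwise (· ≠ ·) → (∀ t ∈ ts, 0 ≤ t.1 ∧ 0 ≤ t.2) →
      pvNoRaise b ts = true →
      spawnLoopA b ts = ts.any (fun t => pvCellD b t.1 t.2 ≠ "_") := by
  induction ts with
  | nil => intro b _ _ _; rfl
  | cons t rest ih =>
    intro b hnd hpos hnr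
    unfold pvNoRaise at hnr
    simp only [Bool.and_eq_true] at hnr
    obtain ⟨hsome, hrest⟩ := hnr
    cases hc : pvPreCell? b t with
    | none => rw [hc] at hsome; simp at hsome
    | some c =>
      have hcell : pvCell? b t.1 t.2 = some c := by rw [cell?_eq_preCell, hc]
      unfold spawnLoopA
      rw [hcell]
      by_cases hcf : c = "_"
      · subst hcf
        have hD : pvCellD b t.1 t.2 = "_" := by unfold pvCellD; rw [hcell]; rfl
        simp only [ne_eq, not_true_eq_false, if_false, List.any_cons, hD,
          decide_false, Bool.false_or]
        rw [hc, if_pos rfl] at hrest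
        have ht0 := hpos t (List.mem_cons_self)
        have hkeep : ∀ t' ∈ rest,
            pvPreCell? (pvSetCell b t.1 t.2 "*") t' = pvPreCell? b t' := by
          intro t' ht'
          have ht'0 := hpos t' (List.mem_cons_of_mem _ ht')
          have hne : (t.1, t.2) ≠ (t'.1, t'.2) := by
            have := (List.pairwise_cons.mp hnd).1 t' ht'
            intro hp
            exact this (by cases t; cases t'; simp_all)
          rw [← cell?_eq_preCell, ← cell?_eq_preCell,
              cell?_setCell_ne b t.1 t.2 t'.1 t'.2 _ ht0.1 ht0.2 ht'0.1 ht'0.2 hne]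
        rw [ih (pvSetCell b t.1 t.2 "*")
              (List.pairwise_cons.mp hnd).2
              (fun t' ht' => hpos t' (List.mem_cons_of_mem _ ht'))
              (by rw [noRaise_congr rest b _ hkeep]; exact hrest)]
        exact PySem.List.any_congr_mem
          (fun t' ht' => by
            unfold pvCellD
            have hk := hkeep t' ht'
            rw [← cell?_eq_preCell, ← cell?_eq_preCell] at hk
            rw [hk])
      · have hD : pvCellD b t.1 t.2 = c := by unfold pvCellD; rw [hcell]; rfl
        simp [hcf, hD]

-- ===== VERDICT (by name: the statement is the Claim_ definition above) =====
theorem spawn_piece_spec : Claim_equal_spawn_piece := by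
  intro b l _ hpre
  unfold Spec_spawn_piece spawn_piece spawn_piece_alt
  rw [tilesA_eq_tiles, tableB_eq_tiles]
  exact loop_eq_any (pvTiles l) b (tiles_shape l).1 (tiles_shape l).2 hpre
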